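-- pv_equiv track=rewrite | github.com/yeyimilk/transfer-contrastive-learning | src/data_loader.py | extend_hard_wave
-- ===== SOURCE A (Python) =====
-- def extend_hard_wave(original_array):
--     extended_array = []
--
--     for i in range(len(original_array)):
--         if len(extended_array) >= 1608:
--             break
--         extended_array.append(original_array[i])
--         if i < len(original_array) - 1:
--             extended_array.append(original_array[i])
--             extended_array.append(original_array[i + 1])
--     return extended_array
-- ===== SOURCE B (Python) =====
-- def extend_hard_wave(original_array):
--     n = len(original_array)
--     if n == 0:
--         return []
--     L = min(3 * n - 2, 1608)
--     return [original_array[k // 3 + (1 if k % 3 == 2 else 0)] for k in range(L)]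
-- ===== Notes on version B (the rewrite author's own statement) =====
-- stated objective: alternative
-- what changed: B is output-indexed: it computes the result length L = min(3n-2, 1608) in closed form and produces element k directly as a[k//3 + (k%3==2)] for k in range(L), instead of A's input-driven loop that appends 3-element chunks and breaks at the cap.
import Mathlib
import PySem

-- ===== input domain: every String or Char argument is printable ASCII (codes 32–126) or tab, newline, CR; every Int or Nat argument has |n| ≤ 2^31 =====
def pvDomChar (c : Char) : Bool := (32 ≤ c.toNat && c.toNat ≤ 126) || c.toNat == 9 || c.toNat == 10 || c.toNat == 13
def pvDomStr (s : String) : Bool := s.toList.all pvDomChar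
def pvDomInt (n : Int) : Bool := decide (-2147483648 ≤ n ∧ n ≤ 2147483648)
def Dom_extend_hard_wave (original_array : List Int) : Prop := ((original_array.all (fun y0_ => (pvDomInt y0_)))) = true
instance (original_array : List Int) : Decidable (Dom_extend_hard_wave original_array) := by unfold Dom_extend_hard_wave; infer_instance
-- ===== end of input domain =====

-- B is output-indexed: closed-form length min(3n-2,1608) and element k computed
-- directly as a[k/3 + (k%3==2)], instead of A's appending loop with a cap-break.

-- ===== PORT A =====
-- loop over the indices of range(len(a)); all indices i satisfy i < a.length (and
-- i+1 < a.length in the guarded branch), so `getD _ 0` is exact for Python's a[i].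
def extendLoopA (a : List Int) : List Nat → List Int → List Int
  | [], ext => ext
  | i :: rest, ext =>
    if 1608 ≤ ext.length then ext
    else
      let ext1 := ext ++ [a.getD i 0]
      let ext2 := if i < a.length - 1 then ext1 ++ [a.getD i 0, a.getD (i+1) 0] else ext1
      extendLoopA a rest ext2

def extend_hard_wave (original_array : List Int) : List Int :=
  extendLoopA original_array (List.range original_array.length) []

-- ===== PORT B =====
-- all accessed indices k/3 + (k%3==2 ? 1 : 0) are < n for k < 3n-2, so getD is exact.
def extend_hard_wave_alt (original_array : List Int) : List Int :=
  let n := original_array.length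
  if n = 0 then []
  else
    let L := min (3 * n - 2) 1608
    (List.range L).map
      (fun k => original_array.getD (k / 3 + (if k % 3 = 2 then 1 else 0)) 0)

-- ===== PRECONDITION & SPEC =====
def Spec_extend_hard_wave (original_array : List Int) (out : List Int) : Prop := out = extend_hard_wave_alt original_array
instance (original_array : List Int) (out : List Int) : Decidable (Spec_extend_hard_wave original_array out) := by unfold Spec_extend_hard_wave; infer_instance

-- ===== CLAIM (what is proved, stated in full; the proofs are below) =====
def Claim_equal_extend_hard_wave : Prop := ∀ (original_array : List Int), Dom_extend_hard_wave original_array → Spec_extend_hard_wave original_array (extend_hard_wave original_array)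

-- ===== LEMMAS AND PROOFS =====

-- the pattern still to be generated by A's loop from index i on
def suffixPat (a : List Int) (i : Nat) : List Int :=
  (List.range' i (a.length - 1 - i)).flatMap
      (fun j => [a.getD j 0, a.getD j 0, a.getD (j+1) 0])
    ++ (if i < a.length then [a.getD (a.length - 1) 0] else [])

theorem extendLoopA_inv (a : List Int) :
    ∀ (k i : Nat) (ext : List Int), k = a.length - i → i ≤ a.length →
    ext.length = 3 * i →
    extendLoopA a (List.range' i k) ext = ext ++ (suffixPat a i).take (1608 - 3 * i) := by
  intro k
  induction k with
  | zero =>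
    intro i ext hk hi hlen
    have : i = a.length := by omega
    subst this
    simp [extendLoopA, suffixPat]
  | succ k ih =>
    intro i ext hk hi hlen
    have hin : i < a.length := by omega
    rw [List.range'_succ, extendLoopA]
    by_cases hcap : 1608 ≤ ext.length
    · have h0 : 1608 - 3 * i = 0 := by omega
      simp [hcap, h0]
    · simp only [if_neg hcap]
      have htk : 3 ≤ 1608 - 3 * i := by omega
      by_cases hlast : i < a.length - 1
      · simp only [if_pos hlast]
        rw [ih (i+1) _ (by omega) (by omega) (by simp [hlen]; ring)]
        have hsuf : suffixPat a i =
            [a.getD i 0, a.getD i 0, a.getD (i+1) 0] ++ suffixPat a (i+1) := by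
          unfold suffixPat
          have h1 : a.length - 1 - i = (a.length - 1 - (i+1)) + 1 := by omega
          rw [h1, List.range'_succ]
          simp [List.flatMap_cons, hin]
          omega
        rw [hsuf]
        obtain ⟨m, hm⟩ : ∃ m, 1608 - 3 * i = m + 3 := ⟨1608 - 3 * i - 3, by omega⟩
        have hm' : 1608 - 3 * (i + 1) = m := by omega
        simp [hm, hm', List.take_succ_cons]
      · have hieq : i = a.length - 1 := by omega
        have hk0 : k = 0 := by omega
        simp only [if_neg hlast, hk0, List.range'_zero, extendLoopA]
        have hsuf : suffixPat a i = [a.getD (a.length - 1) 0] := by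
          unfold suffixPat
          have : a.length - 1 - i = 0 := by omega
          simp [this, hin]
        rw [hsuf]
        simp [hieq]
        omega

-- the chunked flatMap equals an output-indexed map over three times the range
theorem chunk_eq_map (g : Nat → Int) :
    ∀ (m i : Nat),
    (List.range' i m).flatMap (fun j => [g j, g j, g (j+1)]) =
    (List.range' (3*i) (3*m)).map
      (fun k => g (k / 3 + (if k % 3 = 2 then 1 else 0))) := by
  intro m
  induction m with
  | zero => intro i; simp
  | succ m ih =>
    intro i
    rw [List.range'_succ]
    have h3 : 3 * (m+1) = ((3*m)+1+1+1) := by ring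
    rw [h3, List.range'_succ, List.range'_succ, List.range'_succ]
    have e0 : (3*i) / 3 = i := by omega
    have e1 : (3*i+1) / 3 = i := by omega
    have e2 : (3*i+1+1) / 3 = i := by omega
    have m0 : ¬ (3*i) % 3 = 2 := by omega
    have m1 : ¬ (3*i+1) % 3 = 2 := by omega
    have m2 : (3*i+1+1) % 3 = 2 := by omega
    have e3 : 3*i+1+1+1 = 3*(i+1) := by ring
    simp only [List.flatMap_cons, List.map_cons, if_neg m0, if_neg m1, if_pos m2,
               e0, e1, e2, e3, ih (i+1)]
    simp

-- ===== VERDICT (by name: the statement is the Claim_ definition above) =====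
theorem extend_hard_wave_spec : Claim_equal_extend_hard_wave := by
  intro a _
  unfold Spec_extend_hard_wave extend_hard_wave extend_hard_wave_alt
  rw [List.range_eq_range', extendLoopA_inv a a.length 0 [] (by omega) (by omega) (by simp)]
  unfold suffixPat
  rcases hn : a.length with _ | n
  · simp [hn]
  · have hpos : a.length ≠ 0 := by omega
    simp only [if_neg (by omega : ¬ (n+1) = 0), Nat.mul_succ]
    rw [chunk_eq_map]
    have hL : 3 * n + 3 - 2 = 3 * (n + 1 - 1 - 0) + 1 := by omega
    rw [hL]
    have hcat : (List.range' (3*0) (3 * (n + 1 - 1 - 0))).map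
          (fun k => a.getD (k / 3 + (if k % 3 = 2 then 1 else 0)) 0)
        ++ (if (0:Nat) < n + 1 then [a.getD (n + 1 - 1) 0] else [])
        = (List.range' 0 (3 * (n + 1 - 1 - 0) + 1)).map
          (fun k => a.getD (k / 3 + (if k % 3 = 2 then 1 else 0)) 0) := by
      rw [List.range'_1_concat, List.map_append]
      simp
    rw [hcat, ← List.range_eq_range', ← List.map_take, List.take_range]
    simp [Nat.min_comm]
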